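-- pv_equiv track=rewrite | github.com/NobuyukiInoue/LeetCode | Problems/2500_2599/2549_Count_Distinct_Numbers_on_Board/Project_Python3/Count_Distinct_Numbers_on_Board.py | distinctIntegers_deque
-- ===== SOURCE A (Python) =====
-- import collections
--
-- def distinctIntegers_deque(n: int) -> int:
--     # 38ms - 39ms
--     que = collections.deque([])
--     que.append(n)
--     visited = set()
--     visited.add(n)
--     while que:
--         n = que.popleft()
--         for num in range(2, n):
--             if num in visited:
--                 continue
--             if n % num == 1:
--                 visited.add(num)
--                 que.append(num)
--     return len(visited)
-- ===== SOURCE B (Python) =====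
-- def distinctIntegers_deque(n: int) -> int:
--     # Closed form: for n >= 3 the chain n -> n-1 -> ... -> 2 (m % (m-1) == 1)
--     # reaches every integer in [2, n-1], and nothing outside [2, n) is ever added,
--     # so the board ends with {n} union [2, n-1]: n-1 numbers. For n <= 2 only n itself.
--     return max(n - 1, 1)
-- ===== Notes on version B (the rewrite author's own statement) =====
-- stated objective: faster
-- what changed: Replaces the BFS over the n%num==1 reachability graph (deque + visited set + per-node scan of range(2,n)) with the closed form max(n-1,1), proved equal via the chain m -> m-1.
import Mathlib
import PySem

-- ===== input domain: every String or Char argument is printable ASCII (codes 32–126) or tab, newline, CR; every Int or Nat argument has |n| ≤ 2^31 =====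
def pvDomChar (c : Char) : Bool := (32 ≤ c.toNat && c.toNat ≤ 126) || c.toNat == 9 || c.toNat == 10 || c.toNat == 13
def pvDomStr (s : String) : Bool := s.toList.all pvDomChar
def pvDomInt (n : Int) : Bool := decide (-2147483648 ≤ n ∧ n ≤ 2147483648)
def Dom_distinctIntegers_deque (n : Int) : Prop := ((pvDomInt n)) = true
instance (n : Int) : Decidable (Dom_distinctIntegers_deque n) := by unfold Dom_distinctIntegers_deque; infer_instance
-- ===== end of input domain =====

-- B replaces A's BFS over the n%num==1 edges by the closed form max(n-1, 1); objective: faster.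

-- ===== PORT A =====
-- body of A's inner 'for num in range(2, n)' loop: state = (queue, visited)
def pvStep (m : Int) (st : List Int × PySem.Set Int) (num : Int) : List Int × PySem.Set Int :=
  if PySem.Set.contains st.2 num then st            -- if num in visited: continue
  else if PySem.Int.mod m num == 1 then             -- if n % num == 1
    (st.1 ++ [num], PySem.Set.add st.2 num)         -- visited.add(num); que.append(num)
  else st

-- A's 'while que' loop; fuel only makes it total (never exhausted: see the bound in pvBFS_eq below)
def pvBFS (fuel : Nat) (que : List Int) (visited : PySem.Set Int) : Int :=
  match fuel, que with
  | _, [] => (visited.length : Int)                 -- return len(visited)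
  | 0, _ :: _ => (visited.length : Int)             -- fuel guard (unreachable with the fuel supplied)
  | f + 1, m :: rest =>                             -- n = que.popleft()
      let st := (PySem.List.pyRange 2 m 1).foldl (pvStep m) (rest, visited)
      pvBFS f st.1 st.2

def distinctIntegers_deque (n : Int) : Int :=
  pvBFS (2 * n.toNat + 3) [n] (PySem.Set.add PySem.Set.empty n)

-- ===== PORT B =====
def distinctIntegers_deque_alt (n : Int) : Int := max (n - 1) 1

-- ===== PRECONDITION & SPEC =====
def Spec_distinctIntegers_deque (n : Int) (out : Int) : Prop := out = distinctIntegers_deque_alt n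
instance (n : Int) (out : Int) : Decidable (Spec_distinctIntegers_deque n out) := by unfold Spec_distinctIntegers_deque; infer_instance

-- ===== CLAIM (what is proved, stated in full; the proofs are below) =====
def Claim_equal_distinctIntegers_deque : Prop := ∀ (n : Int), Dom_distinctIntegers_deque n → Spec_distinctIntegers_deque n (distinctIntegers_deque n)

-- ===== LEMMAS AND PROOFS =====

-- the elements A's inner loop adds (to both the queue and visited) while scanning l
def pvNew (m : Int) (v : List Int) (l : List Int) : List Int :=
  l.filter (fun x => !(PySem.Set.contains v x) && (PySem.Int.mod m x == 1))

lemma pvContains_append_ne (v : List Int) (x y : Int) (h : y ≠ x) :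
    PySem.Set.contains (v ++ [x]) y = PySem.Set.contains v y := by
  simp [PySem.Set.contains_eq_listContains, h]

lemma pvFold_char (m : Int) (l : List Int) (hn : l.Nodup) : ∀ q v,
    l.foldl (pvStep m) (q, v) = (q ++ pvNew m v l, v ++ pvNew m v l) := by
  induction l with
  | nil => intro q v; simp [pvNew]
  | cons x t ih =>
    intro q v
    have hxt : x ∉ t := (List.nodup_cons.mp hn).1
    have ht : t.Nodup := (List.nodup_cons.mp hn).2
    by_cases hc : PySem.Set.contains v x = true
    · have hmx : x ∈ v := (PySem.Set.contains_iff v x).mp hc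
      have hstep : pvStep m (q, v) x = (q, v) := by simp [pvStep, hmx]
      have hfilt : pvNew m v (x :: t) = pvNew m v t := by
        simp [pvNew, hmx]
      simp only [List.foldl_cons, hstep, hfilt, ih ht]
    · have hxv : x ∉ v := fun hx => hc ((PySem.Set.contains_iff v x).mpr hx)
      by_cases hm : PySem.Int.mod m x = 1
      · have hstep : pvStep m (q, v) x = (q ++ [x], v ++ [x]) := by
          simp [pvStep, hxv, hm]
        have hfilt : pvNew m (v ++ [x]) t = pvNew m v t := by
          apply List.filter_congr
          intro y hy
          rw [pvContains_append_ne v x y (fun he => hxt (he ▸ hy))]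
        have hnew : pvNew m v (x :: t) = x :: pvNew m v t := by
          simp [pvNew, hxv, hm]
        simp only [List.foldl_cons, hstep, ih ht, hfilt, hnew, List.append_assoc,
          List.singleton_append]
      · have hstep : pvStep m (q, v) x = (q, v) := by
          simp [pvStep, hxv, hm]
        have hfilt : pvNew m v (x :: t) = pvNew m v t := by
          simp [pvNew, hm]
        simp only [List.foldl_cons, hstep, hfilt, ih ht]

lemma pvMod_pred (m : Int) (h : 3 ≤ m) : PySem.Int.mod m (m - 1) = 1 := by
  rw [PySem.Int.mod_eq_emod_of_pos (by omega)]
  have h2 : (1 + (m - 1) * 1) % (m - 1) = 1 % (m - 1) := Int.add_mul_emod_self_left 1 (m - 1) 1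
  have h4 : 1 + (m - 1) * 1 = m := by ring
  rw [h4] at h2
  rw [h2]
  exact Int.emod_eq_of_lt (by omega) (by omega)

-- the set A's visited converges to, for n ≥ 3
noncomputable def pvS (n : Int) : Finset ℤ := insert n (Finset.Icc 2 (n - 1))

lemma pvFinal_count (n : Int) (hn : 3 ≤ n) (v : List Int) (hnd : v.Nodup)
    (hsub : ∀ x ∈ v, x = n ∨ (2 ≤ x ∧ x ≤ n - 1)) (hmem : n ∈ v)
    (hcl : ∀ m ∈ v, ∀ x : Int, 2 ≤ x → x < m → PySem.Int.mod m x = 1 → x ∈ v) :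
    (v.length : Int) = n - 1 := by
  have hdown : ∀ j : Nat, 2 ≤ n - j → (n - j) ∈ v := by
    intro j
    induction j with
    | zero => intro _; simpa using hmem
    | succ k ih =>
      intro hj
      have hk : 2 ≤ n - k := by push_cast at hj ⊢; omega
      have hkv : (n - k : Int) ∈ v := ih hk
      have h3 : 3 ≤ n - k := by push_cast at hj ⊢; omega
      have := hcl _ hkv (n - k - 1) (by push_cast at hj ⊢; omega) (by omega)
        (pvMod_pred _ h3)
      have he : (n - (k + 1 : Nat) : Int) = n - k - 1 := by push_cast; ring
      rwa [he]
  have hall : ∀ x : Int, x = n ∨ (2 ≤ x ∧ x ≤ n - 1) → x ∈ v := by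
    rintro x (rfl | ⟨h2, h1⟩)
    · exact hmem
    · have hx : x = n - ((n - x).toNat : Int) := by omega
      rw [hx]; exact hdown (n - x).toNat (by omega)
  have hfin : v.toFinset = pvS n := by
    ext x
    simp only [List.mem_toFinset, pvS, Finset.mem_insert, Finset.mem_Icc]
    exact ⟨fun hx => hsub x hx, fun hx => hall x hx⟩
  have hcardS : (pvS n).card = (n - 2).toNat + 1 := by
    rw [pvS, Finset.card_insert_of_notMem (by simp only [Finset.mem_Icc]; omega)]
    rw [Int.card_Icc]
    omega
  have hlen : v.length = (pvS n).card := by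
    rw [← hfin, List.toFinset_card_of_nodup hnd]
  rw [hlen, hcardS]
  omega

lemma pvBFS_eq (n : Int) (hn : 3 ≤ n) :
    ∀ (fuel : Nat) (q v : List Int),
      v.Nodup →
      (∀ x ∈ q, x ∈ v) →
      (∀ x ∈ v, x = n ∨ (2 ≤ x ∧ x ≤ n - 1)) →
      n ∈ v →
      (∀ m ∈ v, m ∉ q → ∀ x : Int, 2 ≤ x → x < m → PySem.Int.mod m x = 1 → x ∈ v) →
      2 * ((pvS n) \ v.toFinset).card + q.length ≤ fuel →
      pvBFS fuel q v = n - 1 := by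
  intro fuel
  induction fuel with
  | zero =>
    intro q v hnd hq hsub hmem hcl hb
    match q with
    | [] =>
      show (v.length : Int) = n - 1
      exact pvFinal_count n hn v hnd hsub hmem (fun m hm => hcl m hm (by simp))
    | m :: rest => simp at hb
  | succ f ih =>
    intro q v hnd hq hsub hmem hcl hb
    match q with
    | [] =>
      show (v.length : Int) = n - 1
      exact pvFinal_count n hn v hnd hsub hmem (fun m hm => hcl m hm (by simp))
    | m :: rest =>
      have hmv : m ∈ v := hq m (by simp)
      have hmS : m = n ∨ (2 ≤ m ∧ m ≤ n - 1) := hsub m hmv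
      have hmn : m ≤ n := by rcases hmS with h | h <;> omega
      show pvBFS f ((PySem.List.pyRange 2 m 1).foldl (pvStep m) (rest, v)).1
          ((PySem.List.pyRange 2 m 1).foldl (pvStep m) (rest, v)).2 = n - 1
      rw [pvFold_char m _ (PySem.List.nodup_pyRange_one 2 m)]
      set L := pvNew m v (PySem.List.pyRange 2 m 1) with hL
      have hLprop : ∀ x ∈ L, 2 ≤ x ∧ x < m ∧ x ∉ v ∧ PySem.Int.mod m x = 1 := by
        intro x hx
        rw [hL, pvNew, List.mem_filter] at hx
        obtain ⟨hr, hf⟩ := hx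
        rw [PySem.List.mem_pyRange_one] at hr
        simp only [Bool.and_eq_true, Bool.not_eq_true', beq_iff_eq] at hf
        refine ⟨hr.1, hr.2, fun hv => ?_, hf.2⟩
        have h2 := (PySem.Set.contains_iff v x).mpr hv
        rw [hf.1] at h2
        exact Bool.false_ne_true h2
      have hLnd : L.Nodup := List.Nodup.filter _ (PySem.List.nodup_pyRange_one 2 m)
      have hdisj : ∀ x ∈ L, x ∉ v := fun x hx => (hLprop x hx).2.2.1
      have hnd' : (v ++ L).Nodup :=
        List.Nodup.append hnd hLnd (List.disjoint_right.mpr hdisj)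
      have hsub' : ∀ x ∈ v ++ L, x = n ∨ (2 ≤ x ∧ x ≤ n - 1) := by
        intro x hx
        rcases List.mem_append.mp hx with h | h
        · exact hsub x h
        · obtain ⟨h2, hlt, _, _⟩ := hLprop x h
          right; omega
      have hq' : ∀ x ∈ rest ++ L, x ∈ v ++ L := by
        intro x hx
        rcases List.mem_append.mp hx with h | h
        · exact List.mem_append.mpr (Or.inl (hq x (by simp [h])))
        · exact List.mem_append.mpr (Or.inr h)
      have hcl' : ∀ m' ∈ v ++ L, m' ∉ rest ++ L →
          ∀ x : Int, 2 ≤ x → x < m' → PySem.Int.mod m' x = 1 → x ∈ v ++ L := by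
        intro m' hm' hnq x h2 hlt hmod
        rcases List.mem_append.mp hm' with hmv' | hmL
        · by_cases hem : m' = m
          · subst hem
            by_cases hxv : x ∈ v
            · exact List.mem_append.mpr (Or.inl hxv)
            · refine List.mem_append.mpr (Or.inr ?_)
              rw [hL, pvNew, List.mem_filter]
              refine ⟨PySem.List.mem_pyRange_one.mpr ⟨h2, hlt⟩, ?_⟩
              simp only [Bool.and_eq_true, Bool.not_eq_true', beq_iff_eq]
              have hcf : PySem.Set.contains v x = false := by
                simp [PySem.Set.contains_eq_listContains, List.contains_eq_mem, hxv]
              exact ⟨hcf, hmod⟩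
          · have hnr : m' ∉ rest := fun h => hnq (List.mem_append.mpr (Or.inl h))
            have : m' ∉ m :: rest := by simp [hem, hnr]
            exact List.mem_append.mpr (Or.inl (hcl m' hmv' this x h2 hlt hmod))
        · exact absurd (List.mem_append.mpr (Or.inr hmL)) hnq
      have hmem' : n ∈ v ++ L := List.mem_append.mpr (Or.inl hmem)
      -- the measure drops by |L| + 1
      have hLsub : L.toFinset ⊆ pvS n \ v.toFinset := by
        intro x hx
        rw [List.mem_toFinset] at hx
        obtain ⟨h2, hlt, hxv, _⟩ := hLprop x hx
        rw [Finset.mem_sdiff, List.mem_toFinset]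
        refine ⟨?_, hxv⟩
        rw [pvS, Finset.mem_insert, Finset.mem_Icc]
        right; omega
      have hsd : pvS n \ (v ++ L).toFinset = (pvS n \ v.toFinset) \ L.toFinset := by
        ext x
        simp only [Finset.mem_sdiff, List.toFinset_append, Finset.mem_union,
          List.mem_toFinset]
        tauto
      have hcard : (pvS n \ (v ++ L).toFinset).card
          = (pvS n \ v.toFinset).card - L.length := by
        rw [hsd, Finset.card_sdiff_of_subset hLsub, List.toFinset_card_of_nodup hLnd]
      have hLle : L.length ≤ (pvS n \ v.toFinset).card := by
        rw [← List.toFinset_card_of_nodup hLnd]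
        exact Finset.card_le_card hLsub
      have hb' : 2 * (pvS n \ (v ++ L).toFinset).card + (rest ++ L).length ≤ f := by
        rw [hcard, List.length_append]
        simp only [List.length_cons] at hb
        omega
      exact ih (rest ++ L) (v ++ L) hnd' hq' hsub' hmem' hcl' hb' 

-- ===== VERDICT (by name: the statement is the Claim_ definition above) =====
theorem distinctIntegers_deque_spec : Claim_equal_distinctIntegers_deque := by
  intro n _
  unfold Spec_distinctIntegers_deque distinctIntegers_deque distinctIntegers_deque_alt
  rw [PySem.Set.add_of_not_mem (s := PySem.Set.empty) (by simp [PySem.Set.empty])]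
  simp only [PySem.Set.empty, List.nil_append]
  by_cases hn : 3 ≤ n
  · have := pvBFS_eq n hn (2 * n.toNat + 3) [n] [n]
      (by simp) (by simp) (by intro x hx; simp at hx; omega) (by simp)
      (by intro m hm hq; simp at hm hq; omega)
      (by
        have h1 : pvS n \ ([n] : List Int).toFinset = Finset.Icc 2 (n - 1) := by
          ext x
          simp only [pvS, Finset.mem_sdiff, Finset.mem_insert, Finset.mem_Icc,
            List.toFinset_cons, List.toFinset_nil, insert_empty_eq, Finset.mem_singleton]
          omega
        rw [h1, Int.card_Icc]
        simp only [List.length_cons, List.length_nil]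
        omega)
    rw [this]
    omega
  · -- n ≤ 2: range(2, n) is empty, one pop and done with visited = {n}
    have hr : PySem.List.pyRange 2 n 1 = [] := by
      rw [PySem.List.pyRange_one]
      have : (n - 2).toNat = 0 := by omega
      simp [this]
    show pvBFS (2 * n.toNat + 2 + 1) [n] [n] = max (n - 1) 1
    rw [show pvBFS (2 * n.toNat + 2 + 1) [n] [n]
        = pvBFS (2 * n.toNat + 2) ((PySem.List.pyRange 2 n 1).foldl (pvStep n) ([], [n])).1
            ((PySem.List.pyRange 2 n 1).foldl (pvStep n) ([], [n])).2 from rfl]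
    rw [hr]
    show ((1 : Nat) : Int) = max (n - 1) 1
    omega
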